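-- pv_equiv track=rewrite | github.com/karankumbhar47/Crypto_Assignments | Midori(Term_Paper)/MILP_Model/temp.py | convert_equations_to_flat_variables
-- ===== SOURCE A (Python) =====
-- def convert_equations_to_flat_variables(results):
--     converted_equations = []
--     for i, W_bits in enumerate(results):
--         for b, expr in W_bits.items():
--             new_W_var = f"w_{i*4 + b}"
--             new_expr = expr
--             for j in range(4):
--                 for k in range(4):
--                     old_Z_var = f"Z{j}{k}"
--                     new_Z_var = f"z_{j*4 + k}"
--                     new_expr = new_expr.replace(old_Z_var, new_Z_var)
--
--             converted_equations.append(f"{new_W_var} = {new_expr}")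
--     return converted_equations
-- ===== SOURCE B (Python) =====
-- def convert_equations_to_flat_variables(results):
--     return [
--         f"w_{i*4 + b} = {_flatten_z(expr)}"
--         for i, W_bits in enumerate(results)
--         for b, expr in W_bits.items()
--     ]
--
--
-- def _flatten_z(expr):
--     out = []
--     i = 0
--     n = len(expr)
--     while i < n:
--         c = expr[i]
--         if (c == 'Z' and i + 2 < n
--                 and expr[i+1] in ('0', '1', '2', '3')
--                 and expr[i+2] in ('0', '1', '2', '3')):
--             out.append('z_' + str((ord(expr[i+1]) - 48) * 4 + (ord(expr[i+2]) - 48)))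
--             i += 3
--         else:
--             out.append(c)
--             i += 1
--     return ''.join(out)
-- ===== Notes on version B (the rewrite author's own statement) =====
-- stated objective: faster
-- what changed: The 16 sequential full-string str.replace passes (one per Z-variable) are replaced by a single left-to-right scan that rewrites every Z-token in one pass, and the output list is built by a comprehension instead of an accumulator loop.
import Mathlib
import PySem

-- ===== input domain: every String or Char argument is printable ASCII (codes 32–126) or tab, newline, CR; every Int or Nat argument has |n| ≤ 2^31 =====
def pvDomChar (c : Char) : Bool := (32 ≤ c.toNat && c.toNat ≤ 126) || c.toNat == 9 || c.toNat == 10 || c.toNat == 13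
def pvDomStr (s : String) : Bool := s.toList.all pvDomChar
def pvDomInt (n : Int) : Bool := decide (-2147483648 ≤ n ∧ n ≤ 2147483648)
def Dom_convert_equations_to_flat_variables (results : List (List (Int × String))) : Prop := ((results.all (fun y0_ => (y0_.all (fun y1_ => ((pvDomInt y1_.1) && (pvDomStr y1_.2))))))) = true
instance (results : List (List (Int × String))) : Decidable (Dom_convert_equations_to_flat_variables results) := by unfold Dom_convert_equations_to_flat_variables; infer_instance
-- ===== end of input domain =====

-- B replaces A's 16 sequential full-string replace passes by a single left-to-right scan over
-- the expression (measured faster by a constant factor; output built by flatMap/map instead of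
-- an accumulator loop).


-- ===== PORT A =====
-- the nested 'for j in range(4): for k in range(4): new_expr = new_expr.replace(...)' loop
def pvInnerA (expr : List Char) : List Char :=
  (PySem.List.pyRange 0 4 1).foldl (fun e j =>
    (PySem.List.pyRange 0 4 1).foldl (fun e2 k =>
      PySem.Chars.replace e2 ('Z' :: (PySem.Int.toChars j ++ PySem.Int.toChars k))
        ('z' :: '_' :: PySem.Int.toChars (j * 4 + k))) e) expr

def convert_equations_to_flat_variables (results : List (List (Int × String))) : List String :=
  (PySem.List.enumerate results).foldl (fun acc iw =>
    ((PySem.Dict.ofList iw.2).items).foldl (fun acc2 be =>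
      acc2 ++ [String.ofList (('w' :: '_' :: PySem.Int.toChars (iw.1 * 4 + be.1)) ++
        (' ' :: '=' :: ' ' :: pvInnerA be.2.toList))]) acc) []

-- ===== PORT B =====
-- expr[i] in ('0','1','2','3')
def pvAltDigit (c : Char) : Bool := c ∈ ['0', '1', '2', '3']

-- the while loop of _flatten_z, as the obvious structural recursion on the char list
def pvFlattenZ : List Char → List Char
  | [] => []
  | 'Z' :: j :: k :: rest' =>
    if pvAltDigit j && pvAltDigit k then
      'z' :: '_' :: PySem.Int.toChars (((j.toNat : Int) - 48) * 4 + ((k.toNat : Int) - 48))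
        ++ pvFlattenZ rest'
    else 'Z' :: pvFlattenZ (j :: k :: rest')
  | c :: rest => c :: pvFlattenZ rest

def convert_equations_to_flat_variables_alt (results : List (List (Int × String))) : List String :=
  (PySem.List.enumerate results).flatMap (fun iw =>
    ((PySem.Dict.ofList iw.2).items).map (fun be =>
      String.ofList (('w' :: '_' :: PySem.Int.toChars (iw.1 * 4 + be.1)) ++
        (' ' :: '=' :: ' ' :: pvFlattenZ be.2.toList))))

-- ===== PRECONDITION & SPEC =====
def Spec_convert_equations_to_flat_variables (results : List (List (Int × String))) (out : List String) : Prop := out = convert_equations_to_flat_variables_alt results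
instance (results : List (List (Int × String))) (out : List String) : Decidable (Spec_convert_equations_to_flat_variables results out) := by unfold Spec_convert_equations_to_flat_variables; infer_instance

-- ===== CLAIM (what is proved, stated in full; the proofs are below) =====
def Claim_equal_convert_equations_to_flat_variables : Prop := ∀ (results : List (List (Int × String))), Dom_convert_equations_to_flat_variables results → Spec_convert_equations_to_flat_variables results (convert_equations_to_flat_variables results)

-- ===== LEMMAS AND PROOFS =====

-- A's 16 (pattern, replacement) pairs, in the order the nested range(4) loops apply them
def pvPR : List (List Char × List Char) :=
  [(['Z','0','0'], ['z','_','0']), (['Z','0','1'], ['z','_','1']),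
   (['Z','0','2'], ['z','_','2']), (['Z','0','3'], ['z','_','3']),
   (['Z','1','0'], ['z','_','4']), (['Z','1','1'], ['z','_','5']),
   (['Z','1','2'], ['z','_','6']), (['Z','1','3'], ['z','_','7']),
   (['Z','2','0'], ['z','_','8']), (['Z','2','1'], ['z','_','9']),
   (['Z','2','2'], ['z','_','1','0']), (['Z','2','3'], ['z','_','1','1']),
   (['Z','3','0'], ['z','_','1','2']), (['Z','3','1'], ['z','_','1','3']),
   (['Z','3','2'], ['z','_','1','4']), (['Z','3','3'], ['z','_','1','5'])]

def pvFold (L : List (List Char × List Char)) (s : List Char) : List Char :=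
  L.foldl (fun e pr => PySem.Chars.replace e pr.1 pr.2) s

lemma pvRange4 : PySem.List.pyRange 0 4 1 = [0, 1, 2, 3] := by decide

lemma pvInnerA_eq_fold (s : List Char) : pvInnerA s = pvFold pvPR s := by
  simp only [pvInnerA, pvFold, pvPR, pvRange4, List.foldl_cons, List.foldl_nil]
  norm_num
  simp only [show PySem.Int.toChars 0 = ['0'] from rfl, show PySem.Int.toChars 1 = ['1'] from rfl,
    show PySem.Int.toChars 2 = ['2'] from rfl, show PySem.Int.toChars 3 = ['3'] from rfl,
    show PySem.Int.toChars 4 = ['4'] from rfl, show PySem.Int.toChars 5 = ['5'] from rfl,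
    show PySem.Int.toChars 6 = ['6'] from rfl, show PySem.Int.toChars 7 = ['7'] from rfl,
    show PySem.Int.toChars 8 = ['8'] from rfl, show PySem.Int.toChars 9 = ['9'] from rfl,
    show PySem.Int.toChars 10 = ['1','0'] from rfl, show PySem.Int.toChars 11 = ['1','1'] from rfl,
    show PySem.Int.toChars 12 = ['1','2'] from rfl, show PySem.Int.toChars 13 = ['1','3'] from rfl,
    show PySem.Int.toChars 14 = ['1','4'] from rfl, show PySem.Int.toChars 15 = ['1','5'] from rfl,
    List.cons_append, List.nil_append]

-- a pattern/replacement pair of A's shape: pattern 'Z' + two digit chars,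
-- replacement nonempty, starting with 'z' and containing no 'Z'
def pvGood (pr : List Char × List Char) : Prop :=
  (∃ a b, pr.1 = ['Z', a, b] ∧ pvAltDigit a = true ∧ pvAltDigit b = true) ∧
    pr.2 ≠ [] ∧ pr.2.head? = some 'z' ∧ ∀ c ∈ pr.2, c ≠ 'Z'

def pvGoodb (pr : List Char × List Char) : Bool :=
  (match pr.1 with
   | ['Z', a, b] => pvAltDigit a && pvAltDigit b
   | _ => false) &&
  (match pr.2 with
   | 'z' :: _ => true
   | _ => false) &&
  pr.2.all (fun c => c != 'Z')

lemma pvGood_of_goodb (pr : List Char × List Char) (h : pvGoodb pr = true) : pvGood pr := by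
  unfold pvGoodb at h
  rw [Bool.and_eq_true, Bool.and_eq_true] at h
  obtain ⟨⟨h1, h2⟩, h3⟩ := h
  constructor
  · split at h1
    · rename_i a b heq
      rw [Bool.and_eq_true] at h1
      exact ⟨a, b, heq, h1.1, h1.2⟩
    · exact absurd h1 (by simp)
  refine ⟨?_, ?_, ?_⟩
  · split at h2
    · rename_i heq; rw [heq]; simp
    · exact absurd h2 (by simp)
  · split at h2
    · rename_i heq; rw [heq]; rfl
    · exact absurd h2 (by simp)
  · intro c hc
    have := List.all_eq_true.mp h3 c hc
    simpa using this

lemma pvGood_PR : ∀ pr ∈ pvPR, pvGood pr := by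
  intro pr hpr
  exact pvGood_of_goodb pr (List.all_eq_true.mp (by decide : pvPR.all pvGoodb = true) pr hpr)

lemma pvDigit_ne_Z {a : Char} (ha : pvAltDigit a = true) : a ≠ 'Z' := by
  intro h; subst h; simp [pvAltDigit] at ha

lemma pvGo_acc (old new : List Char) :
    ∀ (fuel : Nat) (l acc : List Char),
      PySem.Chars.replace.go old new fuel l acc =
        acc.reverse ++ PySem.Chars.replace.go old new fuel l [] := by
  intro fuel
  induction fuel with
  | zero => intro l acc; simp [PySem.Chars.replace.go]
  | succ f ih =>
    intro l acc
    cases l with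
    | nil => simp [PySem.Chars.replace.go]
    | cons c t =>
      simp only [PySem.Chars.replace.go]
      by_cases h : old.isPrefixOf (c :: t)
      · simp only [h, if_true]
        rw [ih _ (new.reverse ++ acc), ih _ (new.reverse ++ [])]
        simp
      · simp only [h, if_false]
        rw [ih t (c :: acc), ih t [c]]
        simp

lemma pvGo_fuel (old new : List Char) (hold : old ≠ []) :
    ∀ (f1 : Nat) (l : List Char) (f2 : Nat) (acc : List Char), l.length ≤ f1 → l.length ≤ f2 →
      PySem.Chars.replace.go old new f1 l acc = PySem.Chars.replace.go old new f2 l acc := by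
  intro f1
  induction f1 with
  | zero =>
    intro l f2 acc h1 h2
    cases l with
    | nil => cases f2 <;> simp [PySem.Chars.replace.go]
    | cons c t => simp at h1
  | succ f ih =>
    intro l f2 acc h1 h2
    cases l with
    | nil => cases f2 <;> simp [PySem.Chars.replace.go]
    | cons c t =>
      cases f2 with
      | zero => simp at h2
      | succ f2' =>
        simp only [PySem.Chars.replace.go]
        by_cases h : old.isPrefixOf (c :: t)
        · simp only [h, if_true]
          apply ih
          · have : 1 ≤ old.length := by
              cases old with | nil => exact absurd rfl hold | cons a b => simp
            simp only [List.length_drop, List.length_cons] at *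
            omega
          · have : 1 ≤ old.length := by
              cases old with | nil => exact absurd rfl hold | cons a b => simp
            simp only [List.length_drop, List.length_cons] at *
            omega
        · simp only [h, if_false]
          apply ih <;> simp_all

lemma pvReplace_nil (old new : List Char) (hold : old ≠ []) :
    PySem.Chars.replace [] old new = [] := by
  simp [PySem.Chars.replace, PySem.Chars.replace.go, hold]

lemma pvReplace_cons_not_prefix (old new : List Char) (hold : old ≠ []) (c : Char) (s : List Char)
    (h : ¬ old <+: (c :: s)) :
    PySem.Chars.replace (c :: s) old new = c :: PySem.Chars.replace s old new := by
  have hempty : old.isEmpty = false := by cases old with | nil => exact absurd rfl hold | cons a b => rfl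
  have hpre : old.isPrefixOf (c :: s) = false := by
    rw [Bool.eq_false_iff]
    intro hcon
    exact h (List.isPrefixOf_iff_prefix.mp hcon)
  simp only [PySem.Chars.replace, hempty, Bool.false_eq_true, if_false, List.length_cons]
  simp only [PySem.Chars.replace.go, hpre, Bool.false_eq_true, if_false]
  rw [pvGo_acc]
  simp

lemma pvReplace_prefix (old new t : List Char) (hold : old ≠ []) :
    PySem.Chars.replace (old ++ t) old new = new ++ PySem.Chars.replace t old new := by
  cases old with
  | nil => exact absurd rfl hold
  | cons o old' =>
    have hpre : (o :: old').isPrefixOf ((o :: old') ++ t) = true :=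
      List.isPrefixOf_iff_prefix.mpr (List.prefix_append _ _)
    simp only [PySem.Chars.replace, List.isEmpty_cons, Bool.false_eq_true, if_false]
    have hlen : ((o :: old') ++ t).length = (old'.length + t.length) + 1 := by
      simp only [List.length_append, List.length_cons]; omega
    rw [hlen]
    simp only [List.cons_append, PySem.Chars.replace.go, hpre, if_true]
    have hdrop : List.drop (o :: old').length ((o :: old') ++ t) = t := by
      simpa using List.drop_left (o :: old') t
    simp only [List.cons_append] at hdrop
    rw [show List.drop (o :: old').length (o :: (old' ++ t)) = t from hdrop]
    rw [pvGo_fuel _ _ (by simp) (old'.length + t.length) t t.length _ (by omega) (le_refl _)]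
    rw [pvGo_acc]
    simp

lemma pvFold_nil (L : List (List Char × List Char)) (hG : ∀ pr ∈ L, pvGood pr) :
    pvFold L [] = [] := by
  induction L with
  | nil => rfl
  | cons pr L' ih =>
    obtain ⟨⟨a, b, hpat, _, _⟩, _, _, _⟩ := hG pr (by simp)
    have : pr.1 ≠ [] := by rw [hpat]; simp
    simp only [pvFold, List.foldl_cons]
    rw [pvReplace_nil _ _ this]
    exact ih (fun q hq => hG q (by simp [hq]))

lemma pvFold_cons_ne (L : List (List Char × List Char)) (hG : ∀ pr ∈ L, pvGood pr)
    (c : Char) (hc : c ≠ 'Z') (s : List Char) :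
    pvFold L (c :: s) = c :: pvFold L s := by
  induction L generalizing s with
  | nil => rfl
  | cons pr L' ih =>
    obtain ⟨⟨a, b, hpat, _, _⟩, _, _, _⟩ := hG pr (by simp)
    have hne : pr.1 ≠ [] := by rw [hpat]; simp
    have hnp : ¬ pr.1 <+: (c :: s) := by
      rw [hpat]
      intro hcon
      rcases List.cons_prefix_cons.mp hcon with ⟨h1, _⟩
      exact hc h1.symm
    simp only [pvFold, List.foldl_cons]
    rw [pvReplace_cons_not_prefix _ _ hne _ _ hnp]
    exact ih (fun q hq => hG q (by simp [hq])) _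

lemma pvFold_append_noZ (L : List (List Char × List Char)) (hG : ∀ pr ∈ L, pvGood pr)
    (u : List Char) (hu : ∀ c ∈ u, c ≠ 'Z') (s : List Char) :
    pvFold L (u ++ s) = u ++ pvFold L s := by
  induction u with
  | nil => rfl
  | cons c u' ih =>
    simp only [List.cons_append]
    rw [pvFold_cons_ne L hG c (hu c (by simp)) (u' ++ s), ih (fun d hd => hu d (by simp [hd]))]

-- 'the two leading chars are not both digit chars' (so no Z-token can start right here)
def pvNoMatch (t : List Char) : Prop :=
  ∀ a b t', t = a :: b :: t' → ¬(pvAltDigit a = true ∧ pvAltDigit b = true)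

lemma pvReplace_head? (old new : List Char) (hold : old ≠ []) (hnew : new ≠ []) (s : List Char) :
    (PySem.Chars.replace s old new).head? = s.head? ∨
      (PySem.Chars.replace s old new).head? = new.head? := by
  cases s with
  | nil => rw [pvReplace_nil _ _ hold]; left; rfl
  | cons c t =>
    by_cases h : old <+: (c :: t)
    · obtain ⟨u, hu⟩ := h
      right
      rw [← hu, pvReplace_prefix _ _ _ hold]
      cases new with
      | nil => exact absurd rfl hnew
      | cons n ns => rfl
    · left
      rw [pvReplace_cons_not_prefix _ _ hold _ _ h]
      rfl

lemma pvNoMatch_of_head {l : List Char} {c : Char} (hl : l.head? = some c)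
    (hc : pvAltDigit c = false) : pvNoMatch l := by
  intro a b t' heq hab
  rw [heq] at hl
  simp at hl
  rw [hl] at hab
  rw [hab.1] at hc
  simp at hc

lemma pvNoMatch_replace (pr : List Char × List Char) (hG : pvGood pr) (t : List Char)
    (h : pvNoMatch t) : pvNoMatch (PySem.Chars.replace t pr.1 pr.2) := by
  obtain ⟨⟨a, b, hpat, ha, hb⟩, hne, hhead, hnoZ⟩ := hG
  have holdne : pr.1 ≠ [] := by rw [hpat]; simp
  cases t with
  | nil =>
    rw [pvReplace_nil _ _ holdne]
    intro x y t' heq; cases heq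
  | cons c t2 =>
    by_cases hpre : pr.1 <+: (c :: t2)
    · obtain ⟨u, hu⟩ := hpre
      rw [← hu, pvReplace_prefix _ _ _ holdne]
      have : (pr.2 ++ PySem.Chars.replace u pr.1 pr.2).head? = some 'z' := by
        cases hp2 : pr.2 with
        | nil => exact absurd hp2 hne
        | cons z zs => rw [hp2] at hhead; simpa using hhead
      exact pvNoMatch_of_head this (by decide)
    · rw [pvReplace_cons_not_prefix _ _ holdne _ _ hpre]
      by_cases hc : pvAltDigit c = true
      · -- head is a digit; then t2 is empty or starts with a non-digit
        cases t2 with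
        | nil =>
          rw [pvReplace_nil _ _ holdne]
          intro x y t' heq; cases heq
        | cons d t3 =>
          have hd : pvAltDigit d = false := by
            rcases Bool.eq_false_or_eq_true (pvAltDigit d) with h' | h'
            · exact absurd ⟨hc, h'⟩ (h c d t3 rfl)
            · exact h'
          intro x y t' heq hab
          injection heq with h1 h2
          rcases pvReplace_head? pr.1 pr.2 holdne hne (d :: t3) with hh | hh <;>
            rw [h2] at hh <;> simp at hh
          · rw [← hh] at hd; rw [hab.2] at hd; simp at hd
          · have : y = 'z' := by
              cases hp2 : pr.2 with
              | nil => exact absurd hp2 hne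
              | cons z zs =>
                rw [hp2] at hhead hh
                simp at hhead hh
                rw [hh, hhead]
            rw [this] at hab
            exact absurd hab.2 (by decide)
      · intro x y t' heq hab
        injection heq with h1 h2
        rw [← h1] at hab
        rw [hab.1] at hc
        exact hc rfl

lemma pvFold_Z_noMatch (L : List (List Char × List Char)) (hG : ∀ pr ∈ L, pvGood pr)
    (t : List Char) (h : pvNoMatch t) :
    pvFold L ('Z' :: t) = 'Z' :: pvFold L t := by
  induction L generalizing t with
  | nil => rfl
  | cons pr L' ih =>
    obtain ⟨⟨a, b, hpat, ha, hb⟩, hne, hhead, hnoZ⟩ := hG pr (by simp)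
    have holdne : pr.1 ≠ [] := by rw [hpat]; simp
    have hnp : ¬ pr.1 <+: ('Z' :: t) := by
      rw [hpat]
      intro hcon
      rcases List.cons_prefix_cons.mp hcon with ⟨_, hcon2⟩
      rcases hcon2 with ⟨u, hu⟩
      exact h a b u hu.symm ⟨ha, hb⟩
    simp only [pvFold, List.foldl_cons]
    rw [pvReplace_cons_not_prefix _ _ holdne _ _ hnp]
    exact ih (fun q hq => hG q (by simp [hq])) _
      (pvNoMatch_replace pr (hG pr (by simp)) t h)

lemma pvFold_Z_match (L : List (List Char × List Char)) (hG : ∀ pr ∈ L, pvGood pr)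
    (a b : Char) (ha : pvAltDigit a = true) (hb : pvAltDigit b = true) (t : List Char) :
    pvFold L ('Z' :: a :: b :: t) =
      match L.find? (fun pr => pr.1 == ['Z', a, b]) with
      | none => 'Z' :: a :: b :: pvFold L t
      | some pr => pr.2 ++ pvFold L t := by
  induction L generalizing t with
  | nil => rfl
  | cons pr L' ih =>
    obtain ⟨⟨a', b', hpat, ha', hb'⟩, hne, hhead, hnoZ⟩ := hG pr (by simp)
    have holdne : pr.1 ≠ [] := by rw [hpat]; simp
    have hGL' : ∀ q ∈ L', pvGood q := fun q hq => hG q (by simp [hq])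
    by_cases hmatch : pr.1 = ['Z', a, b]
    · have hfind : (pr :: L').find? (fun q => q.1 == ['Z', a, b]) = some pr := by
        rw [List.find?_cons_of_pos]
        simp [hmatch]
      rw [hfind]
      simp only [pvFold, List.foldl_cons]
      have : ('Z' :: a :: b :: t) = pr.1 ++ t := by rw [hmatch]; rfl
      rw [this, pvReplace_prefix _ _ _ holdne]
      exact pvFold_append_noZ L' hGL' pr.2 hnoZ _
    · have hfind : (pr :: L').find? (fun q => q.1 == ['Z', a, b]) =
          L'.find? (fun q => q.1 == ['Z', a, b]) := by
        rw [List.find?_cons_of_neg]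
        simp [hmatch]
      rw [hfind]
      have hnp : ¬ pr.1 <+: ('Z' :: a :: b :: t) := by
        rw [hpat]
        intro hcon
        rcases List.cons_prefix_cons.mp hcon with ⟨_, hcon2⟩
        rcases List.cons_prefix_cons.mp hcon2 with ⟨h1, hcon3⟩
        rcases List.cons_prefix_cons.mp hcon3 with ⟨h2, _⟩
        exact hmatch (by rw [hpat, h1, h2])
      have hnp2 : ¬ pr.1 <+: (a :: b :: t) := by
        rw [hpat]
        intro hcon
        rcases List.cons_prefix_cons.mp hcon with ⟨h1, _⟩
        exact pvDigit_ne_Z ha h1.symm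
      have hnp3 : ¬ pr.1 <+: (b :: t) := by
        rw [hpat]
        intro hcon
        rcases List.cons_prefix_cons.mp hcon with ⟨h1, _⟩
        exact pvDigit_ne_Z hb h1.symm
      simp only [pvFold, List.foldl_cons]
      rw [pvReplace_cons_not_prefix _ _ holdne _ _ hnp,
        pvReplace_cons_not_prefix _ _ holdne _ _ hnp2,
        pvReplace_cons_not_prefix _ _ holdne _ _ hnp3]
      exact ih hGL' _

lemma pvPR_find (a b : Char) (ha : pvAltDigit a = true) (hb : pvAltDigit b = true) :
    pvPR.find? (fun pr => pr.1 == ['Z', a, b]) =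
      some (['Z', a, b],
        'z' :: '_' :: PySem.Int.toChars (((a.toNat : Int) - 48) * 4 + ((b.toNat : Int) - 48))) := by
  have ha' : a = '0' ∨ a = '1' ∨ a = '2' ∨ a = '3' := by
    simpa [pvAltDigit] using ha
  have hb' : b = '0' ∨ b = '1' ∨ b = '2' ∨ b = '3' := by
    simpa [pvAltDigit] using hb
  rcases ha' with rfl | rfl | rfl | rfl <;> rcases hb' with rfl | rfl | rfl | rfl <;> decide

lemma pvFlattenZ_cons_ne (c : Char) (h : c ≠ 'Z') (t : List Char) :
    pvFlattenZ (c :: t) = c :: pvFlattenZ t := by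
  conv_lhs => rw [pvFlattenZ.eq_def]
  split
  · rename_i heq; exact absurd heq (by simp)
  · rename_i heq; injection heq with h1 _; exact absurd h1 h
  · rename_i heq; injection heq with h1 h2; rw [h1, h2]

lemma pvFlattenZ_Z_nil : pvFlattenZ ['Z'] = ['Z'] := by decide

lemma pvFlattenZ_Z_one (a : Char) : pvFlattenZ ['Z', a] = 'Z' :: pvFlattenZ [a] := by
  conv_lhs => rw [pvFlattenZ.eq_def]
  split
  · rename_i heq; exact absurd heq (by simp)
  · rename_i heq
    injection heq with _ h2
    injection h2 with _ h3
    exact absurd h3 (by simp)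
  · rename_i heq; injection heq with h1 h2; rw [h1, h2]

lemma pvFlattenZ_Z_cons3 (a b : Char) (t : List Char) :
    pvFlattenZ ('Z' :: a :: b :: t) =
      if pvAltDigit a && pvAltDigit b then
        'z' :: '_' :: PySem.Int.toChars (((a.toNat : Int) - 48) * 4 + ((b.toNat : Int) - 48))
          ++ pvFlattenZ t
      else 'Z' :: pvFlattenZ (a :: b :: t) := by
  conv_lhs => rw [pvFlattenZ.eq_def]
  split
  · rename_i heq; exact absurd heq (by simp)
  · rename_i heq
    injection heq with _ h2
    injection h2 with e1 h3
    injection h3 with e2 h4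
    rw [e1, e2, h4]
  · rename_i hno heq
    injection heq with h1 h2
    exact (hno a b t h1.symm h2.symm).elim

lemma pvMain (s : List Char) : pvFold pvPR s = pvFlattenZ s := by
  have key : ∀ (n : Nat) (s : List Char), s.length ≤ n → pvFold pvPR s = pvFlattenZ s := by
    intro n
    induction n with
    | zero =>
      intro s hs
      cases s with
      | nil => rw [pvFold_nil pvPR pvGood_PR]; rfl
      | cons c t => simp at hs
    | succ n ih =>
      intro s hs
      cases s with
      | nil => rw [pvFold_nil pvPR pvGood_PR]; rfl
      | cons c t =>
        by_cases hc : c = 'Z'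
        · subst hc
          rcases t with _ | ⟨a, rest⟩
          · rw [pvFold_Z_noMatch pvPR pvGood_PR [] (by intro x y t' heq; cases heq),
              pvFold_nil pvPR pvGood_PR, pvFlattenZ_Z_nil]
          · rcases rest with _ | ⟨b, t'⟩
            · have hnm : pvNoMatch [a] := by intro x y u heq; cases heq
              rw [pvFold_Z_noMatch pvPR pvGood_PR [a] hnm,
                ih [a] (by simp at hs ⊢; omega), pvFlattenZ_Z_one]
            · by_cases hd : pvAltDigit a = true ∧ pvAltDigit b = true
              · rw [pvFold_Z_match pvPR pvGood_PR a b hd.1 hd.2 t', pvPR_find a b hd.1 hd.2,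
                  pvFlattenZ_Z_cons3]
                simp only [hd.1, hd.2, Bool.and_self, if_true,
                  ih t' (by simp at hs; omega)]
              · have hnm : pvNoMatch (a :: b :: t') := by
                  intro x y u heq hab
                  injection heq with e1 e2
                  injection e2 with e2 e3
                  rw [← e1, ← e2] at hab
                  exact hd hab
                have hff : (pvAltDigit a && pvAltDigit b) = false := by
                  rcases Bool.eq_false_or_eq_true (pvAltDigit a) with h' | h' <;>
                    rcases Bool.eq_false_or_eq_true (pvAltDigit b) with h'' | h'' <;>
                      simp [h', h''] at hd ⊢
                rw [pvFold_Z_noMatch pvPR pvGood_PR _ hnm, ih _ (by simp at hs ⊢; omega),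
                  pvFlattenZ_Z_cons3, hff]
                simp only [Bool.false_eq_true, if_false]
        · rw [pvFold_cons_ne pvPR pvGood_PR c hc t, ih t (by simp at hs; omega),
            pvFlattenZ_cons_ne c hc t]
  exact key s.length s (le_refl _)

-- the inner per-item char list built by A resp. B from one expression
lemma pvItem_eq (cs : List Char) : pvInnerA cs = pvFlattenZ cs := by
  rw [pvInnerA_eq_fold, pvMain]

lemma pvFoldl_append_singleton {α β : Type} (g : β → α) :
    ∀ (l : List β) (acc : List α), l.foldl (fun acc2 x => acc2 ++ [g x]) acc = acc ++ l.map g := by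
  intro l
  induction l with
  | nil => intro acc; simp
  | cons x xs ih => intro acc; simp [ih]

lemma pvNestedFoldl {α β γ : Type} (I : β → List γ) (g : β → γ → α) :
    ∀ (xs : List β) (acc : List α),
      xs.foldl (fun acc x => (I x).foldl (fun a2 y => a2 ++ [g x y]) acc) acc
        = acc ++ xs.flatMap (fun x => (I x).map (g x)) := by
  intro xs
  induction xs with
  | nil => intro acc; simp
  | cons x xs ih =>
    intro acc
    rw [List.foldl_cons,
      show (List.foldl (fun a2 y => a2 ++ [g x y]) acc (I x)) = acc ++ (I x).map (g x) from
        pvFoldl_append_singleton _ _ _,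
      ih, List.flatMap_cons, List.append_assoc]

-- ===== VERDICT (by name: the statement is the Claim_ definition above) =====
theorem convert_equations_to_flat_variables_spec : Claim_equal_convert_equations_to_flat_variables := by
  unfold Claim_equal_convert_equations_to_flat_variables
  intro results _
  unfold Spec_convert_equations_to_flat_variables
  unfold convert_equations_to_flat_variables convert_equations_to_flat_variables_alt
  simp only [pvNestedFoldl, List.nil_append, pvItem_eq]
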